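-- pv_equiv track=rewrite | github.com/kinaneb/PYTHON_algo | Karatsuba/tp3_ex1.py | polyProdNaifOps
-- ===== SOURCE A (Python) =====
-- def polyProdNaifOps(P, Q) :
--   R = [0] * (len(P) + len(Q) - 1)
--   ops = len(P) + len(Q) - 1
--   for i in range(len(P)) :
--     for j in range(len(Q)) :
--       R[i + j] += P[i] * Q[j]
--       ops += 3
--   return R,ops
-- ===== SOURCE B (Python) =====
-- def polyProdNaifOps(P, Q):
--     n, m = len(P), len(Q)
--     R = [sum(P[i] * Q[k - i] for i in range(max(0, k + 1 - m), min(k + 1, n)))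
--          for k in range(n + m - 1)]
--     return R, n + m - 1 + 3 * n * m
-- ===== Notes on version B (the rewrite author's own statement) =====
-- stated objective: alternative
-- what changed: B builds each output coefficient directly as a convolution sum over a clipped index range (output-indexed comprehension) and computes the op counter by the closed form n+m-1+3nm, instead of A's in-place accumulation into a zero array with per-step counter increments.
import Mathlib
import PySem

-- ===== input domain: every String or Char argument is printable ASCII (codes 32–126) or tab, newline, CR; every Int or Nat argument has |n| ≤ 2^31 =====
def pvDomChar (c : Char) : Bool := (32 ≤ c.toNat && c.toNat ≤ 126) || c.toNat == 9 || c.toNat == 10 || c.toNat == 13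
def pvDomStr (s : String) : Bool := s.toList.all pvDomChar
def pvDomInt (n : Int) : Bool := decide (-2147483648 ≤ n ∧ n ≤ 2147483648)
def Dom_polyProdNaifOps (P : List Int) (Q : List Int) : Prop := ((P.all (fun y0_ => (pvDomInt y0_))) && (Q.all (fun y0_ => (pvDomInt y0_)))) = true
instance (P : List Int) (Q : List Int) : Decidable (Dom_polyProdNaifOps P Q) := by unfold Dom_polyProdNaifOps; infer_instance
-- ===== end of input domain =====

-- B replaces A's accumulate-into-array double loop and per-step counter by a direct
-- per-coefficient convolution sum and the closed-form op count (objective: alternative).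

-- ===== PORT A =====
-- i, j stay in range throughout (i+j ≤ len(P)+len(Q)-2 < len R), so getD/set are exact
-- for Python's R[i+j] += P[i]*Q[j].
def polyProdNaifOps (P : List Int) (Q : List Int) : List Int × Int :=
  let R : List Int := List.replicate (P.length + Q.length - 1) 0
  let ops : Int := (P.length : Int) + (Q.length : Int) - 1
  (List.range P.length).foldl
    (fun st i =>
      (List.range Q.length).foldl
        (fun st j => (st.1.set (i + j) (st.1.getD (i + j) 0 + P.getD i 0 * Q.getD j 0),
                      st.2 + 3)) st)
    (R, ops)

-- ===== PORT B =====
-- Nat truncated subtraction k+1-Q.length equals Python's max(0, k+1-m).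
def pvConvCoeff (P Q : List Int) (k : Nat) : Int :=
  (List.range' (k + 1 - Q.length) (min (k + 1) P.length - (k + 1 - Q.length))).foldl
    (fun s i => s + P.getD i 0 * Q.getD (k - i) 0) 0

def polyProdNaifOps_alt (P : List Int) (Q : List Int) : List Int × Int :=
  ((List.range (P.length + Q.length - 1)).map (pvConvCoeff P Q),
   (P.length : Int) + (Q.length : Int) - 1 + 3 * (P.length : Int) * (Q.length : Int))

-- ===== PRECONDITION & SPEC =====
def Spec_polyProdNaifOps (P : List Int) (Q : List Int) (out : List Int × Int) : Prop := out = polyProdNaifOps_alt P Q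
instance (P : List Int) (Q : List Int) (out : List Int × Int) : Decidable (Spec_polyProdNaifOps P Q out) := by unfold Spec_polyProdNaifOps; infer_instance

-- ===== CLAIM (what is proved, stated in full; the proofs are below) =====
def Claim_equal_polyProdNaifOps : Prop := ∀ (P : List Int) (Q : List Int), Dom_polyProdNaifOps P Q → Spec_polyProdNaifOps P Q (polyProdNaifOps P Q)

-- ===== LEMMAS AND PROOFS =====

-- the double loop's op counter factors out of the array fold
lemma pv_pairFold {α : Type} (f : α → Nat → α) (c : Int) :
    ∀ (l : List Nat) (R : α) (o : Int),
      l.foldl (fun st x => (f st.1 x, st.2 + c)) (R, o) = (l.foldl f R, o + c * l.length) := by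
  intro l
  induction l with
  | nil => intro R o; simp
  | cons x t ih =>
      intro R o
      rw [List.foldl_cons, List.foldl_cons, ih]
      congr 1
      simp only [List.length_cons]
      push_cast
      ring

-- A's inner loop over j, for an arbitrary bound m
def pvInnerM (P Q : List Int) (i m : Nat) (R : List Int) : List Int :=
  (List.range m).foldl (fun R j => R.set (i + j) (R.getD (i + j) 0 + P.getD i 0 * Q.getD j 0)) R

lemma pvInnerM_length (P Q : List Int) (i : Nat) :
    ∀ (m : Nat) (R : List Int), (pvInnerM P Q i m R).length = R.length := by
  intro m
  induction m with
  | zero => intro R; simp [pvInnerM]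
  | succ m ih =>
      intro R
      rw [pvInnerM, List.range_succ, List.foldl_append]
      simp only [List.foldl_cons, List.foldl_nil]
      rw [List.length_set]
      exact ih R

lemma pv_getD_set (l : List Int) (a k : Nat) (x : Int) :
    (l.set a x).getD k 0 = if k = a ∧ a < l.length then x else l.getD k 0 := by
  rcases Nat.lt_or_ge k l.length with hk | hk
  · rw [List.getD_eq_getElem _ _ (by simpa using hk), List.getElem_set]
    split_ifs with h1 h2 h3 <;> first
    | rfl
    | (exfalso; omega)
    | (rw [List.getD_eq_getElem _ _ hk])
  · rw [List.getD_eq_default _ _ (by simpa using hk)]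
    rw [if_neg (by omega), List.getD_eq_default _ _ hk]

lemma pvInnerM_getD (P Q : List Int) (i k : Nat) :
    ∀ (m : Nat) (R : List Int),
      (pvInnerM P Q i m R).getD k 0
        = R.getD k 0 + (if i ≤ k ∧ k < i + m ∧ k < R.length
                        then P.getD i 0 * Q.getD (k - i) 0 else 0) := by
  intro m
  induction m with
  | zero =>
      intro R
      have h : ¬ (i ≤ k ∧ k < i + 0 ∧ k < R.length) := by omega
      simp only [pvInnerM, List.range_zero, List.foldl_nil]
      rw [if_neg h, add_zero]
  | succ m ih =>
      intro R
      rw [pvInnerM, List.range_succ, List.foldl_append]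
      simp only [List.foldl_cons, List.foldl_nil]
      rw [show List.foldl (fun R j => R.set (i + j) (R.getD (i + j) 0 + P.getD i 0 * Q.getD j 0)) R (List.range m) = pvInnerM P Q i m R from rfl]
      rw [pv_getD_set, pvInnerM_length P Q i m R]
      by_cases hk : k = i + m ∧ i + m < R.length
      · rw [if_pos hk]
        obtain ⟨rfl, h2⟩ := hk
        rw [ih]
        rw [if_neg (by omega), if_pos (by omega), Nat.add_sub_cancel_left]
        ring
      · rw [if_neg hk]
        rw [ih]
        by_cases hnew : i ≤ k ∧ k < i + (m + 1) ∧ k < R.length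
        · have hold : i ≤ k ∧ k < i + m ∧ k < R.length := by omega
          rw [if_pos hnew, if_pos hold]
        · have hold : ¬ (i ≤ k ∧ k < i + m ∧ k < R.length) := by omega
          rw [if_neg hnew, if_neg hold]

-- A's outer loop
def pvOuter (P Q : List Int) (n : Nat) (R : List Int) : List Int :=
  (List.range n).foldl (fun R i => pvInnerM P Q i Q.length R) R

lemma pvOuter_length (P Q : List Int) :
    ∀ (n : Nat) (R : List Int), (pvOuter P Q n R).length = R.length := by
  intro n
  induction n with
  | zero => intro R; simp [pvOuter]
  | succ n ih =>
      intro R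
      rw [pvOuter, List.range_succ, List.foldl_append]
      simp only [List.foldl_cons, List.foldl_nil]
      rw [show List.foldl (fun R i => pvInnerM P Q i Q.length R) R (List.range n) = pvOuter P Q n R from rfl]
      rw [pvInnerM_length, ih]

lemma pvOuter_getD (P Q : List Int) (k : Nat) :
    ∀ (n : Nat) (R : List Int),
      (pvOuter P Q n R).getD k 0
        = R.getD k 0 + ∑ i ∈ Finset.range n,
            (if i ≤ k ∧ k < i + Q.length ∧ k < R.length
             then P.getD i 0 * Q.getD (k - i) 0 else 0) := by
  intro n
  induction n with
  | zero => intro R; simp [pvOuter]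
  | succ n ih =>
      intro R
      rw [pvOuter, List.range_succ, List.foldl_append]
      simp only [List.foldl_cons, List.foldl_nil]
      rw [show List.foldl (fun R i => pvInnerM P Q i Q.length R) R (List.range n) = pvOuter P Q n R from rfl]
      rw [pvInnerM_getD, pvOuter_length, ih, Finset.sum_range_succ]
      ring

lemma pv_foldl_range' (f : Nat → Int) :
    ∀ (c lo : Nat) (s : Int),
      (List.range' lo c).foldl (fun s i => s + f i) s = s + ∑ i ∈ Finset.Ico lo (lo + c), f i := by
  intro c
  induction c with
  | zero => intro lo s; simp
  | succ c ih =>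
      intro lo s
      rw [List.range'_concat, List.foldl_append]
      simp only [List.foldl_cons, List.foldl_nil]
      rw [ih, show lo + (c + 1) = (lo + c) + 1 from rfl,
          Finset.sum_Ico_succ_top (Nat.le_add_right lo c)]
      ring_nf

-- B's coefficient equals A's per-position sum
lemma pvConvCoeff_eq (P Q : List Int) (k : Nat) (hk : k < P.length + Q.length - 1) :
    pvConvCoeff P Q k
      = ∑ i ∈ Finset.range P.length,
          (if i ≤ k ∧ k < i + Q.length ∧ k < P.length + Q.length - 1
           then P.getD i 0 * Q.getD (k - i) 0 else 0) := by
  rw [pvConvCoeff, pv_foldl_range', zero_add, ← Finset.sum_filter]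
  apply Finset.sum_congr _ (fun _ _ => rfl)
  ext i
  simp only [Finset.mem_Ico, Finset.mem_filter, Finset.mem_range]
  omega

lemma pv_main (P Q : List Int) : polyProdNaifOps P Q = polyProdNaifOps_alt P Q := by
  have hA : polyProdNaifOps P Q
      = (pvOuter P Q P.length (List.replicate (P.length + Q.length - 1) 0),
         ((P.length : Int) + (Q.length : Int) - 1) + (3 * (Q.length : Int)) * (P.length : Int)) := by
    rw [polyProdNaifOps]
    have hinner : (fun (st : List Int × Int) (i : Nat) =>
        (List.range Q.length).foldl
          (fun st j => (st.1.set (i + j) (st.1.getD (i + j) 0 + P.getD i 0 * Q.getD j 0),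
                        st.2 + 3)) st)
        = fun st i => (pvInnerM P Q i Q.length st.1, st.2 + 3 * (Q.length : Int)) := by
      funext st i
      have h := pv_pairFold
        (fun R j => R.set (i + j) (R.getD (i + j) 0 + P.getD i 0 * Q.getD j 0)) 3
        (List.range Q.length) st.1 st.2
      simpa [pvInnerM] using h
    rw [hinner]
    have h2 := pv_pairFold (fun R i => pvInnerM P Q i Q.length R) (3 * (Q.length : Int))
      (List.range P.length) (List.replicate (P.length + Q.length - 1) (0 : Int))
      ((P.length : Int) + (Q.length : Int) - 1)
    simpa [pvOuter] using h2
  have hsnd : ((P.length : Int) + (Q.length : Int) - 1) + (3 * (Q.length : Int)) * (P.length : Int)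
      = (P.length : Int) + (Q.length : Int) - 1 + 3 * (P.length : Int) * (Q.length : Int) := by ring
  have hfst : pvOuter P Q P.length (List.replicate (P.length + Q.length - 1) 0)
      = (List.range (P.length + Q.length - 1)).map (pvConvCoeff P Q) := by
    apply List.ext_getElem
    · rw [pvOuter_length, List.length_replicate, List.length_map, List.length_range]
    · intro k h1 h2
      have hk : k < P.length + Q.length - 1 := by
        rw [pvOuter_length, List.length_replicate] at h1; exact h1
      rw [← List.getD_eq_getElem _ 0 h1, List.getElem_map, List.getElem_range,
          pvOuter_getD, pvConvCoeff_eq P Q k hk]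
      simp [List.length_replicate]
  rw [hA, polyProdNaifOps_alt]
  exact Prod.ext hfst hsnd

-- ===== VERDICT (by name: the statement is the Claim_ definition above) =====
theorem polyProdNaifOps_spec : Claim_equal_polyProdNaifOps := by
  intro P Q _
  exact pv_main P Q
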